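-- pv_equiv track=rewrite | github.com/44pie/xray-mass-scanner | sqlmap_runner.py | select_top_vulns
-- ===== SOURCE A (Python) =====
-- def select_top_vulns(vulns, max_count=3):
--     """
--     Select top vulnerabilities for a domain (max 3)
--     Priority: unique parameters first, then unique vulns
--
--     Returns:
--         list: Selected vulnerabilities (max 3)
--     """
--     # Try to select vulnerabilities with unique parameters
--     seen_params = set()
--     selected = []
--
--     for vuln in vulns:
--         param = vuln['parameter']
--         if param not in seen_params:
--             selected.append(vuln)
--             seen_params.add(param)
--             if len(selected) >= max_count:
--                 break
--
--     # If we have less than max_count, add more vulns (even with duplicate params)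
--     if len(selected) < max_count:
--         for vuln in vulns:
--             if vuln not in selected:
--                 selected.append(vuln)
--                 if len(selected) >= max_count:
--                     break
--
--     return selected
-- ===== SOURCE B (Python) =====
-- def select_top_vulns(vulns, max_count=3):
--     # Split vulns once into first occurrences per parameter and the rest,
--     # then fill the selection from firsts, topping up from rest.
--     seen = set()
--     firsts, rest = [], []
--     for v in vulns:
--         p = v['parameter']
--         if p in seen:
--             rest.append(v)
--         else:
--             seen.add(p)
--             firsts.append(v)
--     selected = []
--     for v in firsts:
--         if len(selected) >= max_count:
--             break
--         selected.append(v)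
--     for v in rest:
--         if len(selected) >= max_count:
--             break
--         if v not in selected:
--             selected.append(v)
--     return selected
-- ===== Notes on version B (the rewrite author's own statement) =====
-- stated objective: alternative
-- what changed: A scans the whole vulns list twice (a unique-parameter pass with append-then-check, then a top-up pass that re-reads every vuln and skips members of selected); B makes one splitting pass into firsts/rest and then fills the selection with two bounded check-before-append loops, the top-up reading only the duplicate-parameter rest.
-- intended difference: For nonpositive max_count with nonempty vulns, A returns [vulns[0]] because it appends the first vuln before checking the bound, while B returns [], the intended value of 'select up to max_count'. — e.g. on select_top_vulns([[("parameter", "id")]], 0): A returns [[("parameter", "id")]], B returns []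
import Mathlib
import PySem

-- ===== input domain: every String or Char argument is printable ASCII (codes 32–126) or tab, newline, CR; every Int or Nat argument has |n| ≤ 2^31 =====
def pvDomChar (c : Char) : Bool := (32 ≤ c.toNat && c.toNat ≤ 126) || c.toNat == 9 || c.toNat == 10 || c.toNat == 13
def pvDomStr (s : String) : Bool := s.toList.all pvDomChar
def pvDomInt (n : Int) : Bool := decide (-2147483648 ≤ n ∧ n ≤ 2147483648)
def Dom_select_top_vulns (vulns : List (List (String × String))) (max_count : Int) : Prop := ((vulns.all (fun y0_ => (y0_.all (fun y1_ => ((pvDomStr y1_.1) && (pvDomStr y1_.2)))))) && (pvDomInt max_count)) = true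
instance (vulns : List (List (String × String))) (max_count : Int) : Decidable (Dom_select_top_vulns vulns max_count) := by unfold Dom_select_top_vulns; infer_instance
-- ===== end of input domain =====

-- B replaces A's two scans over the whole vulns list by one splitting pass (firsts/rest)
-- and two bounded check-before-append fill loops (objective: alternative decomposition);
-- on nonpositive max_count with nonempty vulns the two differ (see D_ below).

-- ===== PORT A =====
-- vuln['parameter'] : first-match lookup; total via getD "" — Pre_ guarantees the key is present
def pvKey (v : List (String × String)) : String := (PySem.Dict.mk v).getD "parameter" ""

-- Python dict == : same key/value pairs (exact for dicts, i.e. nodup-key association lists — Pre_ ensures that)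
def pvDictEq (v w : List (String × String)) : Bool :=
  v.all (fun kv => w.contains kv) && w.all (fun kv => v.contains kv)

-- 'vuln in selected' (list membership by dict ==)
def pvDictIn (v : List (String × String)) (sel : List (List (String × String))) : Bool :=
  sel.any (fun w => pvDictEq v w)

-- first loop of A: unique-parameter pass, append then break at max_count
def phase1A : List (List (String × String)) → PySem.Set String → List (List (String × String)) → Int → List (List (String × String))
  | [], _, sel, _ => sel
  | v :: t, seen, sel, m =>
    let p := pvKey v
    if PySem.Set.contains seen p then phase1A t seen sel m
    else
      let sel' := sel ++ [v]
      if m ≤ (sel'.length : Int) then sel'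
      else phase1A t (PySem.Set.add seen p) sel' m

-- second loop of A: top-up with 'vuln not in selected', append then break at max_count
def phase2A : List (List (String × String)) → List (List (String × String)) → Int → List (List (String × String))
  | [], sel, _ => sel
  | v :: t, sel, m =>
    if pvDictIn v sel then phase2A t sel m
    else
      let sel' := sel ++ [v]
      if m ≤ (sel'.length : Int) then sel'
      else phase2A t sel' m

def select_top_vulns (vulns : List (List (String × String))) (max_count : Int) : List (List (String × String)) :=
  let selected := phase1A vulns PySem.Set.empty [] max_count
  if (selected.length : Int) < max_count then phase2A vulns selected max_count else selected

-- ===== PORT B =====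
-- Source B's splitting loop, accumulating (firsts, rest)
def bsplit : List (List (String × String)) → PySem.Set String → List (List (String × String)) × List (List (String × String)) → List (List (String × String)) × List (List (String × String))
  | [], _, acc => acc
  | v :: t, seen, (fs, rs) =>
    let p := pvKey v
    if PySem.Set.contains seen p then bsplit t seen (fs, rs ++ [v])
    else bsplit t (PySem.Set.add seen p) (fs ++ [v], rs)

-- Source B's first fill loop over firsts (length check, then unconditional append)
def bfillFirst : List (List (String × String)) → List (List (String × String)) → Int → List (List (String × String))
  | [], sel, _ => sel
  | v :: t, sel, m =>
    if m ≤ (sel.length : Int) then sel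
    else bfillFirst t (sel ++ [v]) m

-- Source B's top-up loop over rest (length check first, then membership)
def bfillRest : List (List (String × String)) → List (List (String × String)) → Int → List (List (String × String))
  | [], sel, _ => sel
  | v :: t, sel, m =>
    if m ≤ (sel.length : Int) then sel
    else if pvDictIn v sel then bfillRest t sel m
    else bfillRest t (sel ++ [v]) m

def select_top_vulns_alt (vulns : List (List (String × String))) (max_count : Int) : List (List (String × String)) :=
  let fr := bsplit vulns PySem.Set.empty ([], [])
  bfillRest fr.2 (bfillFirst fr.1 [] max_count) max_count

-- ===== PRECONDITION & SPEC =====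
-- Pre_ excludes vulns without a 'parameter' key (Python A raises KeyError) and association
-- lists with duplicate keys (cannot arise from a Python dict; the encoding makes lookup/== ambiguous).
def Pre_select_top_vulns (vulns : List (List (String × String))) (max_count : Int) : Prop :=
  ∀ v ∈ vulns, (v.map Prod.fst).Nodup ∧ "parameter" ∈ v.map Prod.fst
instance (vulns : List (List (String × String))) (max_count : Int) : Decidable (Pre_select_top_vulns vulns max_count) := by unfold Pre_select_top_vulns; infer_instance

def pvWitness_select_top_vulns : (List (List (String × String))) × Int :=
  ([[("parameter", "id"), ("type", "xss")], [("parameter", "q")]], 2)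

-- For nonpositive max_count with nonempty vulns, A returns [vulns[0]] because it appends the
-- first vuln before checking the bound, while B returns [], the intended value of 'select up to max_count'.
def D_select_top_vulns (vulns : List (List (String × String))) (max_count : Int) : Prop :=
  vulns ≠ [] ∧ max_count ≤ 0
instance (vulns : List (List (String × String))) (max_count : Int) : Decidable (D_select_top_vulns vulns max_count) := by unfold D_select_top_vulns; infer_instance

def Spec_select_top_vulns (vulns : List (List (String × String))) (max_count : Int) (out : List (List (String × String))) : Prop := ¬ D_select_top_vulns vulns max_count → out = select_top_vulns_alt vulns max_count
instance (vulns : List (List (String × String))) (max_count : Int) (out : List (List (String × String))) : Decidable (Spec_select_top_vulns vulns max_count out) := by unfold Spec_select_top_vulns; infer_instance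

def pvDiffWitness_select_top_vulns : (List (List (String × String))) × Int :=
  ([[("parameter", "id")]], 0)
def pvDiffWitnessOut_select_top_vulns : (List (List (String × String))) × (List (List (String × String))) :=
  ([[("parameter", "id")]], [])

-- ===== CLAIM (what is proved, stated in full; the proofs are below) =====
def Claim_unchanged_select_top_vulns : Prop := ∀ (vulns : List (List (String × String))) (max_count : Int), Dom_select_top_vulns vulns max_count → Pre_select_top_vulns vulns max_count → Spec_select_top_vulns vulns max_count (select_top_vulns vulns max_count)
def Claim_changed_select_top_vulns : Prop := Dom_select_top_vulns (pvDiffWitness_select_top_vulns.1) (pvDiffWitness_select_top_vulns.2) ∧ Pre_select_top_vulns (pvDiffWitness_select_top_vulns.1) (pvDiffWitness_select_top_vulns.2) ∧ D_select_top_vulns (pvDiffWitness_select_top_vulns.1) (pvDiffWitness_select_top_vulns.2) ∧ select_top_vulns (pvDiffWitness_select_top_vulns.1) (pvDiffWitness_select_top_vulns.2) = pvDiffWitnessOut_select_top_vulns.1 ∧ select_top_vulns_alt (pvDiffWitness_select_top_vulns.1) (pvDiffWitness_select_top_vulns.2) = pvDiffWitnessOut_select_top_vulns.2 ∧ pvDiffWitnessOut_select_top_vulns.1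 ≠ pvDiffWitnessOut_select_top_vulns.2
def Claim_exact_select_top_vulns : Prop := ∀ (vulns : List (List (String × String))) (max_count : Int), Dom_select_top_vulns vulns max_count → Pre_select_top_vulns vulns max_count → D_select_top_vulns vulns max_count → select_top_vulns vulns max_count ≠ select_top_vulns_alt vulns max_count

-- ===== LEMMAS AND PROOFS =====

-- accumulator-free versions of B's split
def pvF : List (List (String × String)) → PySem.Set String → List (List (String × String))
  | [], _ => []
  | v :: t, seen =>
    if PySem.Set.contains seen (pvKey v) then pvF t seen
    else v :: pvF t (PySem.Set.add seen (pvKey v))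

def pvR : List (List (String × String)) → PySem.Set String → List (List (String × String))
  | [], _ => []
  | v :: t, seen =>
    if PySem.Set.contains seen (pvKey v) then v :: pvR t seen
    else pvR t (PySem.Set.add seen (pvKey v))

theorem bsplit_eq (l : List (List (String × String))) : ∀ (seen : PySem.Set String) fs rs,
    bsplit l seen (fs, rs) = (fs ++ pvF l seen, rs ++ pvR l seen) := by
  induction l with
  | nil => intro seen fs rs; simp [bsplit, pvF, pvR]
  | cons v t ih =>
    intro seen fs rs
    by_cases hc : pvKey v ∈ seen <;> simp [bsplit, pvF, pvR, hc, ih]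

theorem bfillRest_of_ge (l : List (List (String × String))) (sel : List (List (String × String)))
    (m : Int) (h : m ≤ (sel.length : Int)) : bfillRest l sel m = sel := by
  cases l with
  | nil => rfl
  | cons v t => simp [bfillRest, h]

theorem take_len_succ {X : Type} (a : List X) (v : X) (b : List X) :
    (a ++ v :: b).take (a.length + 1) = a ++ [v] := by
  induction a with
  | nil => simp
  | cons x xs ih => simpa using ih

theorem bfillFirst_of_ge (l : List (List (String × String))) (sel : List (List (String × String)))
    (m : Int) (h : m ≤ (sel.length : Int)) : bfillFirst l sel m = sel := by
  cases l with
  | nil => rfl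
  | cons v t => simp [bfillFirst, h]

theorem bfillFirst_eq (l : List (List (String × String))) : ∀ sel (m : Int),
    (sel.length : Int) < m → bfillFirst l sel m = (sel ++ l).take m.toNat := by
  induction l with
  | nil =>
    intro sel m h
    have hle : sel.length ≤ m.toNat := by omega
    simp [bfillFirst, List.take_of_length_le hle]
  | cons v t ih =>
    intro sel m h
    have hnle : ¬ m ≤ (sel.length : Int) := by omega
    by_cases hm : m ≤ (sel.length : Int) + 1
    · have hlen : m.toNat = sel.length + 1 := by omega
      have hB : bfillFirst (v :: t) sel m = bfillFirst t (sel ++ [v]) m := by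
        simp [bfillFirst, hnle]
      rw [hB, bfillFirst_of_ge _ _ _ (by simp; omega), hlen, take_len_succ]
    · have hB : bfillFirst (v :: t) sel m = bfillFirst t (sel ++ [v]) m := by
        simp [bfillFirst, hnle]
      rw [hB, ih _ _ (by simp; omega)]
      simp

theorem pvDictEq_refl (v : List (String × String)) : pvDictEq v v = true := by
  simp [pvDictEq, List.all_eq_true]

theorem pvDictIn_append (v w : List (String × String)) (sel : List (List (String × String))) :
    pvDictIn v (sel ++ [w]) = (pvDictIn v sel || pvDictEq v w) := by
  simp [pvDictIn]

theorem pvDictIn_of_mem (v : List (String × String)) (sel : List (List (String × String)))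
    (h : v ∈ sel) : pvDictIn v sel = true := by
  simp [pvDictIn, List.any_eq_true]
  exact ⟨v, h, pvDictEq_refl v⟩

theorem phase1A_eq (l : List (List (String × String))) : ∀ (seen : PySem.Set String) sel (m : Int),
    (sel.length : Int) < m →
    phase1A l seen sel m = (sel ++ pvF l seen).take m.toNat := by
  induction l with
  | nil =>
    intro seen sel m h
    have hle : sel.length ≤ m.toNat := by omega
    simp [phase1A, pvF, List.take_of_length_le hle]
  | cons v t ih =>
    intro seen sel m h
    by_cases hc : pvKey v ∈ seen
    · have hcb : seen.contains (pvKey v) = true := by simpa using hc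
      simp [phase1A, pvF, hc, ih _ _ _ h]
    · have hcb : seen.contains (pvKey v) = false := by simpa using hc
      by_cases hm : m ≤ (sel.length : Int) + 1
      · have hlen : m.toNat = sel.length + 1 := by omega
        have hA : phase1A (v :: t) seen sel m = sel ++ [v] := by
          simp [phase1A, hc, hm]
        rw [hA]
        have hF : pvF (v :: t) seen = v :: pvF t (PySem.Set.add seen (pvKey v)) := by
          simp [pvF, hc]
        rw [hF, hlen, take_len_succ]
      · have hA : phase1A (v :: t) seen sel m =
            phase1A t (PySem.Set.add seen (pvKey v)) (sel ++ [v]) m := by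
          simp [phase1A, hc, hm]
        have hF : pvF (v :: t) seen = v :: pvF t (PySem.Set.add seen (pvKey v)) := by
          simp [pvF, hc]
        rw [hA, hF, ih _ _ _ (by simp; omega)]
        simp

theorem phase2A_eq (l : List (List (String × String))) : ∀ (seen : PySem.Set String) sel (m : Int),
    (sel.length : Int) < m →
    (∀ v ∈ pvF l seen, pvDictIn v sel = true) →
    phase2A l sel m = bfillRest (pvR l seen) sel m := by
  induction l with
  | nil => intro seen sel m _ _; simp [phase2A, pvR, bfillRest]
  | cons v t ih =>
    intro seen sel m h hall
    by_cases hc : pvKey v ∈ seen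
    · -- v is a duplicate-parameter element: it goes to rest
      have hcb : seen.contains (pvKey v) = true := by simpa using hc
      have hFs : pvF (v :: t) seen = pvF t seen := by simp [pvF, hc]
      have hRs : pvR (v :: t) seen = v :: pvR t seen := by simp [pvR, hc]
      rw [hFs] at hall
      rw [hRs]
      by_cases hin : pvDictIn v sel = true
      · rw [show phase2A (v :: t) sel m = phase2A t sel m by simp [phase2A, hin],
          show bfillRest (v :: pvR t seen) sel m = bfillRest (pvR t seen) sel m by
            simp [bfillRest, hin]; omega]
        exact ih seen sel m h hall
      · by_cases hm : m ≤ (sel.length : Int) + 1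
        · rw [show phase2A (v :: t) sel m = sel ++ [v] by
            simp [phase2A, hin, hm]]
          rw [show bfillRest (v :: pvR t seen) sel m = bfillRest (pvR t seen) (sel ++ [v]) m by
            simp [bfillRest, hin]; omega]
          exact (bfillRest_of_ge _ _ _ (by simp; omega)).symm
        · rw [show phase2A (v :: t) sel m = phase2A t (sel ++ [v]) m by
            simp [phase2A, hin, hm]]
          rw [show bfillRest (v :: pvR t seen) sel m = bfillRest (pvR t seen) (sel ++ [v]) m by
            simp [bfillRest, hin]; omega]
          refine ih seen (sel ++ [v]) m (by simp; omega) ?_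
          intro w hw
          rw [pvDictIn_append, hall w hw, Bool.true_or]
    · -- v is a first occurrence: already in selected, skipped by phase2A; absent from rest
      have hcb : seen.contains (pvKey v) = false := by simpa using hc
      have hFs : pvF (v :: t) seen = v :: pvF t (PySem.Set.add seen (pvKey v)) := by
        simp [pvF, hc]
      have hRs : pvR (v :: t) seen = pvR t (PySem.Set.add seen (pvKey v)) := by
        simp [pvR, hc]
      have hv : pvDictIn v sel = true := hall v (by rw [hFs]; exact List.mem_cons_self ..)
      rw [hRs, show phase2A (v :: t) sel m = phase2A t sel m by simp [phase2A, hv]]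
      refine ih (PySem.Set.add seen (pvKey v)) sel m h ?_
      intro w hw
      exact hall w (by rw [hFs]; exact List.mem_cons_of_mem _ hw)

-- ===== VERDICT (by name: the statements are the Claim_ definitions above) =====
theorem select_top_vulns_spec : Claim_unchanged_select_top_vulns := by
  intro vulns m _ _
  unfold Spec_select_top_vulns
  intro hnd
  unfold select_top_vulns select_top_vulns_alt
  rw [bsplit_eq]
  simp only [List.nil_append]
  by_cases hm : 0 < m
  · rw [phase1A_eq vulns PySem.Set.empty [] m (by simpa using hm)]
    rw [bfillFirst_eq _ _ _ (by simpa using hm)]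
    simp only [List.nil_append]
    by_cases hlt : (((pvF vulns PySem.Set.empty).take m.toNat).length : Int) < m
    · have hfull : (pvF vulns PySem.Set.empty).take m.toNat = pvF vulns PySem.Set.empty := by
        apply List.take_of_length_le
        by_contra hgt
        simp only [not_le] at hgt
        rw [List.length_take] at hlt
        push_cast at hlt
        omega
      rw [hfull] at hlt ⊢
      rw [if_pos hlt]
      exact phase2A_eq vulns PySem.Set.empty _ m hlt (fun v hv => pvDictIn_of_mem v _ hv)
    · rw [if_neg hlt, bfillRest_of_ge _ _ _ (by omega)]
  · have hve : vulns = [] := by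
      unfold D_select_top_vulns at hnd
      by_contra h
      exact hnd ⟨h, by omega⟩
    subst hve
    simp [phase1A, phase2A, pvF, pvR, bfillFirst, bfillRest]

theorem select_top_vulns_changed : Claim_changed_select_top_vulns := by
  unfold Claim_changed_select_top_vulns; decide

theorem select_top_vulns_tight : Claim_exact_select_top_vulns := by
  intro vulns m _ _ hD
  obtain ⟨hne, hm⟩ := hD
  cases vulns with
  | nil => exact absurd rfl hne
  | cons v t =>
    have hc : PySem.Set.contains PySem.Set.empty (pvKey v) = false := rfl
    have hA : select_top_vulns (v :: t) m = [v] := by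
      unfold select_top_vulns
      have h1 : phase1A (v :: t) PySem.Set.empty [] m = [v] := by
        simp [phase1A]
        omega
      rw [h1, if_neg (by simp; omega)]
    have hB : select_top_vulns_alt (v :: t) m = [] := by
      unfold select_top_vulns_alt
      rw [bsplit_eq]
      simp only [List.nil_append]
      have hF : pvF (v :: t) PySem.Set.empty
          = v :: pvF t (PySem.Set.add PySem.Set.empty (pvKey v)) := by
        simp [pvF]
      have h2 : bfillFirst (pvF (v :: t) PySem.Set.empty) [] m = [] := by
        rw [hF]
        simp [bfillFirst]
        omega
      rw [h2]
      exact bfillRest_of_ge _ _ _ (by simp; omega)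
    rw [hA, hB]
    simp
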